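-- pv_equiv track=rewrite | github.com/unspoken666/Code | python/spell_check.py | spelling_corrector
-- ===== SOURCE A (Python) =====
-- def find_mismatch(s1,s2):
--     s1 = s1.lower()
--     s2 = s2.lower()
--
--     if s1 == s2:
--         return 0
--     flag = 0
--     if len(s1) == len(s2):
--         for i in range(len(s1)):
--             if  s1[i] != s2[i]:
--                  flag += 1
--         if flag == 1:
--             return 1
--     else:
--         return 2
--
-- def single_insert_or_delete(s1,s2):
--     s1 = s1.lower()
--     s2 = s2.lower()
--     if s1 == s2:
--         return 0
--
--     if len(s1)-len(s2) < 0: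
--         s1,s2 = s2,s1
--     if len(s1)-len(s2) == 1:
--         for i in range(len(s1)):
--             s = s1[0:i]+s1[i+1:]
--             if s == s2:
--                 return 1
--     return 2
--
-- def spelling_corrector(s,ls):
--     s = s.lower()
--     s = s.strip(" ")
--     ls1 = s.split(" ")
--     for i in range(len(ls1)):
--         for j in range(len(ls)):
--              if find_mismatch(ls1[i],ls[j]) == 1 or single_insert_or_delete(ls1[i],ls[j]) == 1:
--                     ls1[i] = ls[j]
--     return " ".join(ls1).lower()
-- ===== SOURCE B (Python) =====
-- def _near(a, b):
--     # edit distance exactly 1 via one forward scan to the first mismatch,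
--     # then a single suffix comparison (no per-position rebuild, no mismatch count)
--     if len(a) < len(b):
--         a, b = b, a
--     if len(a) - len(b) > 1:
--         return False
--     i = 0
--     while i < len(b) and a[i] == b[i]:
--         i += 1
--     if len(a) == len(b):
--         return a[i+1:] == b[i+1:]
--     return a[i+1:] == b[i:]
--
-- def spelling_corrector(s, ls):
--     dl = [d.lower() for d in ls]
--     out = []
--     for w in s.lower().strip(" ").split(" "):
--         for d in dl:
--             if w != d and _near(w, d):
--                 w = d
--         out.append(w)
--     return " ".join(out)
-- ===== Notes on version B (the rewrite author's own statement) =====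
-- stated objective: faster
-- what changed: B lowercases the dictionary once and decides the edit-distance-1 test per pair with a single forward scan to the first mismatch plus one suffix comparison, instead of A's per-position mismatch counting and per-position delete-and-rebuild of every candidate deletion.
import Mathlib
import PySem

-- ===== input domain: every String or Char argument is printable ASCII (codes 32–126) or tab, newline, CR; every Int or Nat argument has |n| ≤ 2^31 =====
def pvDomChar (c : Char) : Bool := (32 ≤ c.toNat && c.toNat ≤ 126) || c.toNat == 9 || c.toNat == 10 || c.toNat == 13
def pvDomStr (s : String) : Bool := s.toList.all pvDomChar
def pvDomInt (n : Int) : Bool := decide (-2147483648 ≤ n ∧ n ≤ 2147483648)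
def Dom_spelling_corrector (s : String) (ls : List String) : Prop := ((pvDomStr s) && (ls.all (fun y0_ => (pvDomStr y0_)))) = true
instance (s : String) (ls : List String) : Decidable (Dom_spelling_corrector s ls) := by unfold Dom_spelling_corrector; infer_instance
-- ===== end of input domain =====

-- B replaces A's per-pair mismatch count / per-position deletion rebuild by a single
-- forward scan to the first mismatch plus one suffix comparison (objective: faster,
-- constant-factor; return value only — neither program mutates its arguments).

-- ===== PORT A =====
-- body of find_mismatch after the two `s = s.lower()` reassignments
def pvFmCore (x y : List Char) : Option Int :=
  if x = y then some 0
  else if x.length = y.length then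
    -- flag-counting loop over range(len(s1)); x[i]? = s1[i] (all i in range, so `some _`)
    (if ((List.range x.length).foldl
          (fun f i => if x[i]? ≠ y[i]? then f + 1 else f) (0 : Int)) = 1
     then some 1 else none)   -- falls off the function body: Python returns None
  else some 2

def find_mismatch (s1 s2 : List Char) : Option Int :=
  pvFmCore (PySem.Chars.lower s1) (PySem.Chars.lower s2)

-- body of single_insert_or_delete after the lowering reassignments
def pvSidCore (x y : List Char) : Int :=
  if x = y then 0
  else
    let p := if (x.length : Int) - (y.length : Int) < 0 then (y, x) else (x, y)
    if (p.1.length : Int) - (p.2.length : Int) = 1 then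
      -- s1[0:i] + s1[i+1:] = take i ++ drop (i+1)  (exact: 0 ≤ i < len)
      (if (List.range p.1.length).any
            (fun i => decide (p.1.take i ++ p.1.drop (i + 1) = p.2))
       then 1 else 2)
    else 2

def single_insert_or_delete (s1 s2 : List Char) : Int :=
  pvSidCore (PySem.Chars.lower s1) (PySem.Chars.lower s2)

def spelling_corrector (s : String) (ls : List String) : String :=
  let s0 := PySem.Chars.lower s.toList
  let s1 := PySem.Chars.stripChars s0 [' ']
  let ls1 := PySem.Chars.splitOn s1 [' ']
  -- for i in range(len(ls1)): for j: if …: ls1[i] = ls[j]   (each cell updated independently)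
  let ls2 := ls1.map (fun w => ls.foldl
      (fun w d =>
        if find_mismatch w d.toList = some 1 ∨ single_insert_or_delete w d.toList = 1
        then d.toList else w) w)
  String.ofList (PySem.Chars.lower (PySem.Chars.join [' '] ls2))

-- ===== PORT B =====
-- while i < len(b) and a[i] == b[i]: i += 1   (common-prefix scan)
def pvPref : List Char → List Char → Nat
  | a :: as, b :: bs => if a = b then pvPref as bs + 1 else 0
  | _, _ => 0

def pvNear (a b : List Char) : Bool :=
  let p := if a.length < b.length then (b, a) else (a, b)
  if (p.1.length : Int) - (p.2.length : Int) > 1 then false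
  else
    let i := pvPref p.1 p.2
    if p.1.length = p.2.length then decide (p.1.drop (i + 1) = p.2.drop (i + 1))
    else decide (p.1.drop (i + 1) = p.2.drop i)

def spelling_corrector_alt (s : String) (ls : List String) : String :=
  let dl := ls.map (fun d => PySem.Chars.lower d.toList)
  let ws := PySem.Chars.splitOn (PySem.Chars.stripChars (PySem.Chars.lower s.toList) [' ']) [' ']
  let out := ws.foldl
    (fun out w =>
      out ++ [dl.foldl (fun w d => if w ≠ d ∧ pvNear w d = true then d else w) w]) []
  String.ofList (PySem.Chars.join [' '] out)

-- ===== PRECONDITION & SPEC =====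
def Spec_spelling_corrector (s : String) (ls : List String) (out : String) : Prop := out = spelling_corrector_alt s ls
instance (s : String) (ls : List String) (out : String) : Decidable (Spec_spelling_corrector s ls out) := by unfold Spec_spelling_corrector; infer_instance

-- ===== CLAIM (what is proved, stated in full; the proofs are below) =====
def Claim_equal_spelling_corrector : Prop := ∀ (s : String) (ls : List String), Dom_spelling_corrector s ls → Spec_spelling_corrector s ls (spelling_corrector s ls)

-- ===== LEMMAS AND PROOFS =====

theorem pvLowerChar_idem (c : Char) :
    PySem.Chars.lowerChar (PySem.Chars.lowerChar c) = PySem.Chars.lowerChar c := by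
  unfold PySem.Chars.lowerChar PySem.Chars.isupper
  by_cases h : 'A' ≤ c ∧ c ≤ 'Z'
  · have h1 : (65 : Nat) ≤ c.toNat := h.1
    have h2 : c.toNat ≤ 90 := h.2
    have hv : (c.toNat + 32).isValidChar := by left; omega
    have hx : (Char.ofNat (c.toNat + 32)).toNat = c.toNat + 32 := by
      rw [Char.toNat_ofNat, if_pos hv]
    have hns : ¬ (Char.ofNat (c.toNat + 32) ≤ 'Z') := by
      intro hle
      have : (Char.ofNat (c.toNat + 32)).toNat ≤ 90 := hle
      omega
    simp [h.1, h.2, hns]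
  · have hb : (decide ('A' ≤ c) && decide (c ≤ 'Z')) = false := by
      by_cases h1 : 'A' ≤ c <;> by_cases h2 : c ≤ 'Z' <;> simp_all
    simp [hb]

theorem pvLower_fix_of {cs : List Char} (h : ∀ c ∈ cs, PySem.Chars.lowerChar c = c) :
    PySem.Chars.lower cs = cs := by
  simp only [PySem.Chars.lower]
  calc List.map PySem.Chars.lowerChar cs = List.map id cs := List.map_congr_left (by simpa using h)
    _ = cs := List.map_id cs

theorem pvMem_lower_fix {c : Char} {cs : List Char} (h : c ∈ PySem.Chars.lower cs) :
    PySem.Chars.lowerChar c = c := by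
  simp only [PySem.Chars.lower, List.mem_map] at h
  obtain ⟨x, -, rfl⟩ := h
  exact pvLowerChar_idem x

theorem pvMem_stripChars {c : Char} {cs chars : List Char}
    (h : c ∈ PySem.Chars.stripChars cs chars) : c ∈ cs := by
  simp only [PySem.Chars.stripChars, List.mem_reverse] at h
  have h2 := (List.dropWhile_sublist _).mem h
  rw [List.mem_reverse] at h2
  exact (List.dropWhile_sublist _).mem h2

theorem pvSplitOn_go_chars (sep : List Char) (fuel : Nat) (l cur : List Char)
    (acc : List (List Char)) {w : List Char} {c : Char}
    (hw : w ∈ PySem.Chars.splitOn.go sep fuel l cur acc) (hc : c ∈ w) :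
    c ∈ l ∨ c ∈ cur ∨ ∃ w' ∈ acc, c ∈ w' := by
  induction fuel generalizing l cur acc with
  | zero =>
    rw [PySem.Chars.splitOn.go.eq_def] at hw
    simp only [List.mem_reverse, List.mem_cons] at hw
    rcases hw with rfl | hw
    · rcases List.mem_append.mp hc with h | h
      · exact Or.inr (Or.inl (List.mem_reverse.mp h))
      · exact Or.inl h
    · exact Or.inr (Or.inr ⟨w, hw, hc⟩)
  | succ fuel ih =>
    rw [PySem.Chars.splitOn.go.eq_def] at hw
    cases l with
    | nil =>
      simp only [List.mem_reverse, List.mem_cons] at hw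
      rcases hw with rfl | hw
      · exact Or.inr (Or.inl (List.mem_reverse.mp hc))
      · exact Or.inr (Or.inr ⟨w, hw, hc⟩)
    | cons a rest =>
      simp only at hw
      split at hw
      · rcases ih _ _ _ hw with h | h | h
        · exact Or.inl ((List.drop_sublist _ _).mem h)
        · simp at h
        · rcases h with ⟨w', hw', hcw'⟩
          rcases List.mem_cons.mp hw' with rfl | hw''
          · exact Or.inr (Or.inl (List.mem_reverse.mp hcw'))
          · exact Or.inr (Or.inr ⟨w', hw'', hcw'⟩)
      · rcases ih _ _ _ hw with h | h | h
        · exact Or.inl (List.mem_cons_of_mem _ h)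
        · rcases List.mem_cons.mp h with rfl | h'
          · exact Or.inl List.mem_cons_self
          · exact Or.inr (Or.inl h')
        · exact Or.inr (Or.inr h)

theorem pvMem_splitOn_chars {w cs sep : List Char} {c : Char}
    (hw : w ∈ PySem.Chars.splitOn cs sep) (hc : c ∈ w) : c ∈ cs := by
  have := pvSplitOn_go_chars sep (cs.length + 1) cs [] [] hw hc
  simpa using this

theorem pvLower_join (parts : List (List Char)) :
    PySem.Chars.lower (PySem.Chars.join [' '] parts)
      = PySem.Chars.join [' '] (parts.map PySem.Chars.lower) := by
  induction parts with
  | nil => simp [PySem.Chars.join_nil, PySem.Chars.lower]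
  | cons p rest ih =>
    cases rest with
    | nil => simp [PySem.Chars.join_singleton]
    | cons q rest' =>
      rw [PySem.Chars.join_cons_cons, List.map_cons, List.map_cons, PySem.Chars.join_cons_cons]
      rw [List.map_cons] at ih
      simp only [PySem.Chars.lower, List.map_append] at ih ⊢
      rw [ih]
      rfl

-- mismatch count (the value of A's flag loop)
def pvMmc (x y : List Char) : Nat :=
  (List.range x.length).countP (fun i => decide (x[i]? ≠ y[i]?))

theorem pvMmc_cons (a b : Char) (x y : List Char) :
    pvMmc (a :: x) (b :: y) = (if a = b then 0 else 1) + pvMmc x y := by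
  unfold pvMmc
  rw [List.length_cons, List.range_succ_eq_map, List.countP_cons, List.countP_map]
  simp only [List.getElem?_cons_zero, List.getElem?_cons_succ, Function.comp_def, Nat.succ_eq_add_one]
  by_cases h : a = b <;> simp [h, Nat.add_comm]

theorem pvMmc_zero {x y : List Char} (hl : x.length = y.length) :
    pvMmc x y = 0 ↔ x = y := by
  induction x generalizing y with
  | nil => cases y with
    | nil => simp [pvMmc]
    | cons b ys => simp at hl
  | cons a xs ih =>
    cases y with
    | nil => simp at hl
    | cons b ys =>
      rw [pvMmc_cons]
      have hl' : xs.length = ys.length := by simpa using hl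
      by_cases h : a = b
      · simp [h, ih hl']
      · simp [h]

theorem pvMmc_one {x y : List Char} (hl : x.length = y.length) (hne : x ≠ y) :
    pvMmc x y = 1 ↔ x.drop (pvPref x y + 1) = y.drop (pvPref x y + 1) := by
  induction x generalizing y with
  | nil => cases y with
    | nil => exact absurd rfl hne
    | cons b ys => simp at hl
  | cons a xs ih =>
    cases y with
    | nil => simp at hl
    | cons b ys =>
      have hl' : xs.length = ys.length := by simpa using hl
      rw [pvMmc_cons]
      by_cases h : a = b
      · subst h
        have hne' : xs ≠ ys := fun he => hne (by rw [he])
        rw [show pvPref (a :: xs) (a :: ys) = pvPref xs ys + 1 by simp [pvPref]]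
        rw [List.drop_succ_cons, List.drop_succ_cons]
        simpa using ih hl' hne'
      · simp only [if_neg h]
        rw [show pvPref (a :: xs) (b :: ys) = 0 by simp [pvPref, h]]
        rw [List.drop_succ_cons, List.drop_succ_cons, List.drop_zero, List.drop_zero]
        constructor
        · intro h1
          have : pvMmc xs ys = 0 := by omega
          exact (pvMmc_zero hl').mp this
        · intro h1
          have : pvMmc xs ys = 0 := (pvMmc_zero hl').mpr h1
          omega

theorem pvDel_any {u v : List Char} (hl : u.length = v.length + 1) :
    (List.range u.length).any (fun i => decide (u.take i ++ u.drop (i + 1) = v)) = true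
      ↔ u.drop (pvPref u v + 1) = v.drop (pvPref u v) := by
  induction u generalizing v with
  | nil => simp at hl
  | cons a us ih =>
    cases v with
    | nil =>
      have : us = [] := by simpa using hl
      subst this
      simp [pvPref]
    | cons b vs =>
      have hl' : us.length = vs.length + 1 := by simpa using hl
      rw [List.length_cons, List.range_succ_eq_map]
      rw [List.any_cons, List.any_map]
      simp only [Function.comp_def, Nat.succ_eq_add_one, List.take_succ_cons,
        List.take_zero, List.drop_succ_cons, List.drop_zero, List.nil_append,
        List.cons_append, List.cons.injEq]
      by_cases h : a = b
      · subst h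
        rw [show pvPref (a :: us) (a :: vs) = pvPref us vs + 1 by simp [pvPref]]
        simp only [List.drop_succ_cons, true_and]
        rw [← ih hl']
        constructor
        · intro hx
          rcases Bool.or_eq_true .. |>.mp hx with h0 | hA
          · -- us = a :: vs : deletion at 0 inside us works
            have h0' : us = a :: vs := by simpa using h0
            have hmem : 0 ∈ List.range us.length := by
              simp only [List.mem_range]; omega
            refine List.any_eq_true.mpr ⟨0, hmem, ?_⟩
            simp [h0']
          · exact hA
        · intro hx
          exact Bool.or_eq_true .. |>.mpr (Or.inr hx)
      · rw [show pvPref (a :: us) (b :: vs) = 0 by simp [pvPref, h]]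
        simp only [List.drop_zero]
        constructor
        · intro hx
          rcases Bool.or_eq_true .. |>.mp hx with h0 | hA
          · simpa using h0
          · rcases List.any_eq_true.mp hA with ⟨i, hi, hdel⟩
            simp only [decide_eq_true_eq] at hdel
            exact absurd hdel.1 h
        · intro hx
          refine Bool.or_eq_true .. |>.mpr (Or.inl ?_)
          simpa using hx

theorem pvCond_iff (x y : List Char) :
    (pvFmCore x y = some 1 ∨ pvSidCore x y = 1) ↔ (x ≠ y ∧ pvNear x y = true) := by
  by_cases hxy : x = y
  · subst hxy; simp [pvFmCore, pvSidCore]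
  · have hflag : (List.range x.length).foldl
        (fun f i => if x[i]? ≠ y[i]? then f + 1 else f) (0 : Int) = (pvMmc x y : Int) := by
      rw [PySem.List.foldl_ite_add_one (fun i => x[i]? ≠ y[i]?)]
      simp [pvMmc]
    rcases lt_trichotomy x.length y.length with hlt | heq | hgt
    · have hne : ¬ (x.length = y.length) := by omega
      have hyx : ¬ (y.length = x.length) := by omega
      have hsw : (x.length : Int) - (y.length : Int) < 0 := by omega
      have hswB : x.length < y.length := hlt
      by_cases hd : y.length = x.length + 1
      · have h1 : (y.length : Int) - (x.length : Int) = 1 := by omega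
        have h6 : ¬ ((y.length : Int) - (x.length : Int) > 1) := by omega
        by_cases ha : (List.range y.length).any
            (fun i => decide (y.take i ++ y.drop (i + 1) = x)) = true
        · have hdrop := (pvDel_any hd).mp ha
          simp [pvFmCore, pvSidCore, pvNear, hxy, hne, hyx, hsw, hswB, h1, ha, hdrop]
        · have hdrop : ¬ (y.drop (pvPref y x + 1) = x.drop (pvPref y x)) :=
            fun h => ha ((pvDel_any hd).mpr h)
          simp [pvFmCore, pvSidCore, pvNear, hxy, hne, hyx, hsw, hswB, h1, ha, hdrop]
      · have h1 : ¬ ((y.length : Int) - (x.length : Int) = 1) := by omega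
        have h6 : (y.length : Int) - (x.length : Int) > 1 := by omega
        simp [pvFmCore, pvSidCore, pvNear, hxy, hne, hsw, hswB, h1, h6]
    · have hsw : ¬ ((x.length : Int) - (y.length : Int) < 0) := by omega
      have hswB : ¬ (x.length < y.length) := by omega
      have h3 : ¬ ((x.length : Int) - (y.length : Int) = 1) := by omega
      have h6 : ¬ ((x.length : Int) - (y.length : Int) > 1) := by omega
      by_cases hm : pvMmc x y = 1
      · have hm' : ((pvMmc x y : Int) = 1) := by exact_mod_cast hm
        have hdrop := (pvMmc_one heq hxy).mp hm
        simp [pvFmCore, pvSidCore, pvNear, hxy, heq, hdrop]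
        simp only [ne_eq, ite_not] at hflag
        rw [← heq, hflag]
        exact hm'
      · have hm' : ¬ ((pvMmc x y : Int) = 1) := by exact_mod_cast hm
        have hdrop : ¬ (x.drop (pvPref x y + 1) = y.drop (pvPref x y + 1)) :=
          fun h => hm ((pvMmc_one heq hxy).mpr h)
        simp [pvFmCore, pvSidCore, pvNear, hxy, heq, hdrop]
        simp only [ne_eq, ite_not] at hflag
        rw [← heq, hflag]
        exact hm'
    · have hne : ¬ (x.length = y.length) := by omega
      have hsw : ¬ ((x.length : Int) - (y.length : Int) < 0) := by omega
      have hswB : ¬ (x.length < y.length) := by omega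
      by_cases hd : x.length = y.length + 1
      · have h1 : (x.length : Int) - (y.length : Int) = 1 := by omega
        have h6 : ¬ ((x.length : Int) - (y.length : Int) > 1) := by omega
        by_cases ha : (List.range x.length).any
            (fun i => decide (x.take i ++ x.drop (i + 1) = y)) = true
        · have hdrop := (pvDel_any hd).mp ha
          simp [pvFmCore, pvSidCore, pvNear, hxy, hne, hswB, h1, ha, hdrop]
        · have hdrop : ¬ (x.drop (pvPref x y + 1) = y.drop (pvPref x y)) :=
            fun h => ha ((pvDel_any hd).mpr h)
          simp [pvFmCore, pvSidCore, pvNear, hxy, hne, hswB, h1, ha, hdrop]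
      · have h1 : ¬ ((x.length : Int) - (y.length : Int) = 1) := by omega
        have h6 : (x.length : Int) - (y.length : Int) > 1 := by omega
        simp [pvFmCore, pvSidCore, pvNear, hxy, hne, hsw, hswB, h1, h6]

theorem pvFold (ls : List String) (w : List Char) :
    PySem.Chars.lower (ls.foldl
      (fun w d =>
        if find_mismatch w d.toList = some 1 ∨ single_insert_or_delete w d.toList = 1
        then d.toList else w) w)
    = (ls.map (fun d => PySem.Chars.lower d.toList)).foldl
        (fun w d => if w ≠ d ∧ pvNear w d = true then d else w)
        (PySem.Chars.lower w) := by
  induction ls generalizing w with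
  | nil => rfl
  | cons d ls ih =>
    have hstep : PySem.Chars.lower
        (if find_mismatch w d.toList = some 1 ∨ single_insert_or_delete w d.toList = 1
         then d.toList else w)
        = (if PySem.Chars.lower w ≠ PySem.Chars.lower d.toList ∧
              pvNear (PySem.Chars.lower w) (PySem.Chars.lower d.toList) = true
           then PySem.Chars.lower d.toList else PySem.Chars.lower w) := by
      have hiff := pvCond_iff (PySem.Chars.lower w) (PySem.Chars.lower d.toList)
      by_cases hc : find_mismatch w d.toList = some 1 ∨ single_insert_or_delete w d.toList = 1
      · rw [if_pos hc, if_pos (hiff.mp hc)]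
      · rw [if_neg hc, if_neg (fun hr => hc (hiff.mpr hr))]
    rw [List.foldl_cons, List.map_cons, List.foldl_cons, ih, hstep]

-- ===== VERDICT (by name: the statement is the Claim_ definition above) =====
theorem spelling_corrector_spec : Claim_equal_spelling_corrector := by
  intro s ls _
  unfold Spec_spelling_corrector spelling_corrector spelling_corrector_alt
  simp only []
  rw [PySem.List.foldl_append_singleton_eq_map
      (fun w => (ls.map (fun d => PySem.Chars.lower d.toList)).foldl
        (fun w d => if w ≠ d ∧ pvNear w d = true then d else w) w)]
  rw [List.nil_append]
  apply congrArg String.ofList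
  rw [pvLower_join, List.map_map]
  apply congrArg (PySem.Chars.join [' '])
  apply List.map_congr_left
  intro w hw
  have hfix : PySem.Chars.lower w = w :=
    pvLower_fix_of (fun c hc => pvMem_lower_fix (pvMem_stripChars (pvMem_splitOn_chars hw hc)))
  have := pvFold ls w
  rw [hfix] at this
  exact this
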